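-- pv_equiv track=rewrite | github.com/logan2139652/01_test | src/db/topology/A7C2topo.py | transformRoute2List
-- ===== SOURCE A (Python) =====
-- def transformRoute2List(allpath):
--     """
--     将[(0,1),(1,2),(2,3)]路由转换为[0,1,2,3]
--     仅仅针对edge_path使用, 但是edge_path的函数比较少，因此可以基本不用该函数
--     :param allpath: 一个源到目的的所有路径，[[(),(),()], [(),(),()], [(),(),()]]
--     :return: [[],[],[]]
--     """
--     result = []
--     for path in allpath:
--         temp = []  #单个path的
--         for index, item in enumerate(path):
--             if index == len(path) - 1:
--                 temp.extend(item)  # extend将tuple叉开为一个个元素加入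
--             else:
--                 temp.append(item[0])  # extend无法添加item[0]
--         result.append(temp)
--     return result
-- ===== SOURCE B (Python) =====
-- def _nodes(path):
--     # structural recursion on the edge list: a singleton edge splices whole,
--     # otherwise take the head node and recurse on the tail
--     if not path:
--         return []
--     head, *rest = path
--     if not rest:
--         return list(head)
--     return [head[0]] + _nodes(rest)
--
--
-- def transformRoute2List(allpath):
--     return [_nodes(path) for path in allpath]
-- ===== Notes on version B (the rewrite author's own statement) =====
-- stated objective: alternative
-- what changed: Replaces A's indexed enumerate loop with its index==len(path)-1 test by structural recursion on each path (base cases empty and singleton edge, recursive step cons), with no indices or length computation.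
import Mathlib
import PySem

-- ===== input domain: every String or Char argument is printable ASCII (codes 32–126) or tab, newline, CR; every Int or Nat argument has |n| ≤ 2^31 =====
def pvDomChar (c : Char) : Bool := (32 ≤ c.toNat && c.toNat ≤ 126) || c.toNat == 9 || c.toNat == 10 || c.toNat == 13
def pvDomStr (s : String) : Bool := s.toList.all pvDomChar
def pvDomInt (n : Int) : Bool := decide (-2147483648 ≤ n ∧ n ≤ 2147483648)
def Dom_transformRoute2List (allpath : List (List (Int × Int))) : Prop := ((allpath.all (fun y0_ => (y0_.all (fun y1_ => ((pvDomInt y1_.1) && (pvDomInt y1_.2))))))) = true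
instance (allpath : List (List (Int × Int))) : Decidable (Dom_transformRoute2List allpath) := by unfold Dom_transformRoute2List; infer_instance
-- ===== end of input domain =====

-- B replaces A's indexed enumerate loop (with its index==len-1 test) by structural
-- recursion on each path: a different decomposition of the same linear task.

-- ===== PORT A =====
-- inner loop of A: enumerate(path) with the index == len(path) - 1 branch
def transformRoute2List (allpath : List (List (Int × Int))) : List (List Int) :=
  allpath.foldl (fun result path =>
    result ++ [(PySem.List.enumerate path).foldl
      (fun temp p =>
        if p.1 == (path.length : Int) - 1 then temp ++ [p.2.1, p.2.2]
        else temp ++ [p.2.1]) []]) []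

-- ===== PORT B =====
-- Source B's _nodes: structural recursion on the edge list
def nodesRec : List (Int × Int) → List Int
  | [] => []
  | [e] => [e.1, e.2]
  | e :: f :: rest => e.1 :: nodesRec (f :: rest)

def transformRoute2List_alt (allpath : List (List (Int × Int))) : List (List Int) :=
  allpath.map nodesRec

-- ===== PRECONDITION & SPEC =====
def Spec_transformRoute2List (allpath : List (List (Int × Int))) (out : List (List Int)) : Prop := out = transformRoute2List_alt allpath
instance (allpath : List (List (Int × Int))) (out : List (List Int)) : Decidable (Spec_transformRoute2List allpath out) := by unfold Spec_transformRoute2List; infer_instance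

-- ===== CLAIM =====
def Claim_equal_transformRoute2List : Prop := ∀ (allpath : List (List (Int × Int))), Dom_transformRoute2List allpath → Spec_transformRoute2List allpath (transformRoute2List allpath)

-- ===== LEMMAS AND PROOFS =====

-- the inner fold of A computes nodesRec (general accumulator and start index)
theorem inner_aux (n : Int) : ∀ (xs : List (Int × Int)) (s : Int) (acc : List Int),
    s = n - xs.length →
    (PySem.List.enumerate xs s).foldl
      (fun temp p =>
        if p.1 == n - 1 then temp ++ [p.2.1, p.2.2] else temp ++ [p.2.1]) acc
    = acc ++ nodesRec xs := by
  intro xs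
  induction xs with
  | nil => intro s acc _; simp [PySem.List.enumerate_nil, nodesRec]
  | cons x xs ih =>
    intro s acc hs
    rw [PySem.List.enumerate_cons, List.foldl_cons]
    cases xs with
    | nil =>
      simp only [List.length_cons, List.length_nil] at hs
      have : s == n - 1 := by simp; omega
      simp [this, PySem.List.enumerate_nil, nodesRec]
    | cons y ys =>
      have : ¬ (s == n - 1) := by
        simp only [List.length_cons] at hs
        simp only [beq_iff_eq]
        push_cast at hs ⊢
        omega
      simp only [this, Bool.false_eq_true, if_false]
      rw [ih (s+1) (acc ++ [x.1]) (by simp at hs ⊢; push_cast at hs ⊢; omega)]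
      simp [nodesRec]

theorem inner_eq (path : List (Int × Int)) :
    (PySem.List.enumerate path).foldl
      (fun temp p =>
        if p.1 == (path.length : Int) - 1 then temp ++ [p.2.1, p.2.2]
        else temp ++ [p.2.1]) []
    = nodesRec path := by
  have := inner_aux (path.length : Int) path 0 [] (by simp)
  simpa using this

theorem main_eq (allpath : List (List (Int × Int))) :
    transformRoute2List allpath = transformRoute2List_alt allpath := by
  unfold transformRoute2List transformRoute2List_alt
  induction allpath using List.reverseRecOn with
  | nil => rfl
  | append_singleton xs x ih =>
    rw [List.foldl_append, List.map_append, ih]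
    simp only [List.foldl_cons, List.foldl_nil, List.map_cons, List.map_nil]
    rw [inner_eq]

-- ===== VERDICT =====
theorem transformRoute2List_spec : Claim_equal_transformRoute2List :=
  fun allpath _ => main_eq allpath
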